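-- pv_equiv track=rewrite | github.com/AlejandroRJBatuecas/TFG_ProyectoML | lector_archivos_ast.py | contar_instrucciones
-- ===== SOURCE A (Python) =====
-- def contar_instrucciones(instrucciones):
--     conteo = {}
--     for circuito, instruccion in instrucciones:
--         if circuito not in conteo:
--             conteo[circuito] = {}
--         if instruccion not in conteo[circuito]:
--             conteo[circuito][instruccion] = 0
--         conteo[circuito][instruccion] += 1
--     return conteo
-- ===== SOURCE B (Python) =====
-- def contar_instrucciones(instrucciones):
--     # group-then-count: one pass groups instructions per circuit,
--     # then each group's list is tallied by a comprehension.
--     grupos = {}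
--     for circuito, instruccion in instrucciones:
--         grupos.setdefault(circuito, []).append(instruccion)
--     return {c: {i: lst.count(i) for i in dict.fromkeys(lst)}
--             for c, lst in grupos.items()}
-- ===== Notes on version B (the rewrite author's own statement) =====
-- stated objective: alternative
-- what changed: B first groups instructions into per-circuit lists in one pass and then tallies each list with a count comprehension over its distinct elements, instead of A's single incremental nested-dict counting pass.
import Mathlib
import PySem

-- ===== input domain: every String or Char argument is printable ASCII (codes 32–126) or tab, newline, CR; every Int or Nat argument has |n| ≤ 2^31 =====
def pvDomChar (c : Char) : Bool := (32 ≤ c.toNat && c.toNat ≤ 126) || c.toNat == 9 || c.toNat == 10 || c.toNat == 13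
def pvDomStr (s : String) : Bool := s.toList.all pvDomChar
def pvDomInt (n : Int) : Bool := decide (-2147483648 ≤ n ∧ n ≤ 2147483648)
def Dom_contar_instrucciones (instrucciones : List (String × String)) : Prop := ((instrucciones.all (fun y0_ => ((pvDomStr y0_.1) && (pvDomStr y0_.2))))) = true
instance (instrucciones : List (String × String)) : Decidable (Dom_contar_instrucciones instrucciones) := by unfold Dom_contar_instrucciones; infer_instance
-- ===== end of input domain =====

-- B groups instructions into per-circuit lists first and tallies each group afterwards — an alternative decomposition of A's single incremental counting pass.

-- ===== PORT A =====
def contar_instrucciones (instrucciones : List (String × String)) : List (String × List (String × Int)) :=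
  let conteo := instrucciones.foldl (fun conteo p =>
    let conteo := if conteo.contains p.1 then conteo else conteo.insert p.1 PySem.Dict.empty
    let inner := conteo.getD p.1 PySem.Dict.empty
    let inner := if inner.contains p.2 then inner else inner.insert p.2 (0 : Int)
    conteo.insert p.1 (inner.insert p.2 (inner.getD p.2 0 + 1)))
    PySem.Dict.empty
  conteo.items.map (fun q => (q.1, q.2.items))

-- ===== PORT B =====
def contar_instrucciones_alt (instrucciones : List (String × String)) : List (String × List (String × Int)) :=
  let grupos := instrucciones.foldl (fun d p => d.modify p.1 [] (· ++ [p.2])) PySem.Dict.empty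
  grupos.items.map (fun q => (q.1, (PySem.Set.ofList q.2).map (fun i => (i, (q.2.count i : Int)))))

-- ===== PRECONDITION & SPEC =====
def Spec_contar_instrucciones (instrucciones : List (String × String)) (out : List (String × List (String × Int))) : Prop := out = contar_instrucciones_alt instrucciones
instance (instrucciones : List (String × String)) (out : List (String × List (String × Int))) : Decidable (Spec_contar_instrucciones instrucciones out) := by unfold Spec_contar_instrucciones; infer_instance

-- ===== CLAIM (what is proved, stated in full; the proofs are below) =====
def Claim_equal_contar_instrucciones : Prop := ∀ (instrucciones : List (String × String)), Dom_contar_instrucciones instrucciones → Spec_contar_instrucciones instrucciones (contar_instrucciones instrucciones)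

-- ===== LEMMAS AND PROOFS =====

-- A's loop state after one step, written as a single nested insert.
def stepA' (d : PySem.Dict String (PySem.Dict String Int)) (p : String × String) : PySem.Dict String (PySem.Dict String Int) :=
  d.insert p.1 ((d.getD p.1 PySem.Dict.empty).insert p.2 ((d.getD p.1 PySem.Dict.empty).getD p.2 0 + 1))

-- A's loop body equals stepA'.
theorem stepA_eq (d : PySem.Dict String (PySem.Dict String Int)) (p : String × String) :
    (let conteo := if d.contains p.1 then d else d.insert p.1 PySem.Dict.empty
     let inner := conteo.getD p.1 PySem.Dict.empty
     let inner := if inner.contains p.2 then inner else inner.insert p.2 (0 : Int)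
     conteo.insert p.1 (inner.insert p.2 (inner.getD p.2 0 + 1)))
    = stepA' d p := by
  obtain ⟨c, i⟩ := p
  unfold stepA'
  simp only
  by_cases hc : d.contains c
  · simp only [hc, if_true]
    by_cases hi : (d.getD c PySem.Dict.empty).contains i
    · simp [hi]
    · simp only [hi, Bool.false_eq_true, if_false]
      rw [show ((d.getD c PySem.Dict.empty).insert i 0).getD i 0 = 0 from
            PySem.Dict.getD_insert_self _ _ _ _,
          PySem.Dict.insert_insert_self,
          show (d.getD c PySem.Dict.empty).getD i 0 = 0 from
            PySem.Dict.getD_of_not_contains _ _ (by simpa using hi)]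
  · simp only [hc, Bool.false_eq_true, if_false]
    rw [show (d.insert c PySem.Dict.empty).getD c PySem.Dict.empty = PySem.Dict.empty from
          PySem.Dict.getD_insert_self _ _ _ _,
        show d.getD c PySem.Dict.empty = PySem.Dict.empty from
          PySem.Dict.getD_of_not_contains _ _ (by simpa using hc)]
    simp only [PySem.Dict.contains_empty, Bool.false_eq_true, if_false]
    rw [show (PySem.Dict.empty.insert i (0:Int)).getD i 0 = 0 from
          PySem.Dict.getD_insert_self _ _ _ _,
        PySem.Dict.insert_insert_self, PySem.Dict.insert_insert_self,
        show PySem.Dict.empty.getD i (0:Int) = 0 from PySem.Dict.getD_empty _ _]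

-- pointwise value of A's fold: per circuit it is the counting fold over that circuit's instructions
theorem foldA_getD (l : List (String × String)) (d : PySem.Dict String (PySem.Dict String Int)) (c : String) :
    (l.foldl stepA' d).getD c PySem.Dict.empty
    = ((l.filter (fun p => p.1 == c)).map (·.2)).foldl (fun inner i => inner.insert i (inner.getD i 0 + 1)) (d.getD c PySem.Dict.empty) := by
  induction l generalizing d with
  | nil => rfl
  | cons p l ih =>
    simp only [List.foldl_cons, List.filter_cons]
    by_cases h : p.1 = c
    · simp only [h, beq_self_eq_true, if_true, List.map_cons, List.foldl_cons]
      rw [ih]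
      unfold stepA'
      rw [h, PySem.Dict.getD_insert_self]
    · have hb : (p.1 == c) = false := beq_eq_false_iff_ne.mpr h
      simp only [hb, Bool.false_eq_true, if_false]
      rw [ih]
      unfold stepA'
      rw [PySem.Dict.getD_insert]
      simp [Ne.symm h]

theorem contar_instrucciones_eq_alt (l : List (String × String)) :
    contar_instrucciones l = contar_instrucciones_alt l := by
  unfold contar_instrucciones contar_instrucciones_alt
  simp only
  rw [show (fun (conteo : PySem.Dict String (PySem.Dict String Int)) (p : String × String) =>
        let conteo := if conteo.contains p.1 then conteo else conteo.insert p.1 PySem.Dict.empty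
        let inner := conteo.getD p.1 PySem.Dict.empty
        let inner := if inner.contains p.2 then inner else inner.insert p.2 (0 : Int)
        conteo.insert p.1 (inner.insert p.2 (inner.getD p.2 0 + 1)))
      = stepA' from funext fun d => funext fun p => stepA_eq d p]
  set dA := l.foldl stepA' PySem.Dict.empty with hdA
  set gB := l.foldl (fun d p => d.modify p.1 [] (· ++ [p.2])) PySem.Dict.empty with hgB
  have hndA : dA.keys.Nodup := by
    rw [hdA]
    exact PySem.Dict.nodup_keys_foldl_insert_key l (·.1) _ _ (by simp [PySem.Dict.keys_empty])
  have hndB : gB.keys.Nodup := by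
    rw [hgB]
    exact PySem.Dict.nodup_keys_foldl_modify_key l (·.1) [] (fun _ p => (· ++ [p.2])) _ (by simp [PySem.Dict.keys_empty])
  have hk : dA.keys = gB.keys := by
    rw [hdA, hgB]; unfold stepA'
    rw [PySem.Dict.keys_foldl_insert_key l (·.1),
        PySem.Dict.keys_foldl_modify_key l (·.1) [] (fun _ p => (· ++ [p.2]))]
    simp [PySem.Dict.keys_empty]
  rw [PySem.Dict.items_eq_map_keys dA hndA PySem.Dict.empty,
      PySem.Dict.items_eq_map_keys gB hndB [], List.map_map, List.map_map, hk]
  refine congrArg (fun f => gB.keys.map f) (funext fun k => ?_)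
  simp only [Function.comp]
  have h1 : dA.getD k PySem.Dict.empty = PySem.Dict.counter ((l.filter (fun p => p.1 == k)).map (·.2)) := by
    rw [hdA, foldA_getD, PySem.Dict.getD_empty]
    exact PySem.Dict.foldl_insert_getD_add_one_eq_counter _
  have h2 : gB.getD k [] = (l.filter (fun p => p.1 == k)).map (·.2) := by
    rw [hgB, PySem.Dict.getD_foldl_modify_append, PySem.Dict.getD_empty, List.nil_append]
  rw [h1, h2, PySem.Dict.items_counter]

-- ===== VERDICT (by name: the statement is the Claim_ definition above) =====
theorem contar_instrucciones_spec : Claim_equal_contar_instrucciones := by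
  intro l _
  exact contar_instrucciones_eq_alt l
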